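-- pv_equiv track=rewrite | github.com/chuckinator0/Projects | scripts/vines.py | mergingVines
-- ===== SOURCE A (Python) =====
-- from functools import reduce
--
-- def mergingVines(vines, n):
--
-- 	# We will use this function to modify the sumOnce function further down.
-- 	# nTimes is itself a function object. When we use it as a decorator, an
-- 	# input of sumOnce (another function object) will be passed into it.
-- 	def nTimes(func):
-- 		# We want to return a function, so we define a wrapper function that modifies
-- 		# the behavior of func to what we want. Here, we want func to compose with itself n times.
-- 		def wrapper(*args,**kwargs):
-- 			# if the function has been applied 0 times, its effect is that of the identity function
-- 			if n == 0:
-- 				return (lambda x: x)(*args,**kwargs)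
-- 			else:
-- 				return reduce(lambda f,g: lambda x: f(g(x)) , [ func for _ in range(n) ])(*args,**kwargs)
-- 		# we return this wrapper function object, so when nTimes decorates sumOnce,
-- 		# the sumOnce function will be passed as an argument to nTimes. Note that we could have
-- 		# just passed the vines variable into wrapper, but in general, decorators might decorate functions
-- 		# with different numbers or kinds of inputs, so we can use *args (lists of arguments) and
-- 		# **kwargs (keyword arguments) to be more general.
-- 		return wrapper
--
--
-- 	# Here's the decorator! We are modifying the sumOnce function
-- 	@nTimes
-- 	def sumOnce(vines):
-- 		res = [vines[i] + vines[i + 1] for i in range(0, len(vines) - 1, 2)]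
-- 		if len(vines) % 2 == 1:
-- 			res.append(vines[-1])
-- 		return res
--
-- 	# The decorator has modified sumOnce, so now when we call it, it will actually be applied n times, as
-- 	# specified by the decorator function.
-- 	return sumOnce(vines)
-- ===== SOURCE B (Python) =====
-- def mergingVines(vines, n):
--     L = len(vines)
--     if L == 0:
--         return []
--     size = 1 << min(n, L.bit_length())
--     return [sum(vines[i:i + size]) for i in range(0, L, size)]
-- ===== Notes on version B (the rewrite author's own statement) =====
-- stated objective: faster
-- what changed: B replaces A's n-fold composition of the pairwise-merge pass with a single pass that sums contiguous blocks of size 2^min(n, len.bit_length()).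
import Mathlib
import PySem

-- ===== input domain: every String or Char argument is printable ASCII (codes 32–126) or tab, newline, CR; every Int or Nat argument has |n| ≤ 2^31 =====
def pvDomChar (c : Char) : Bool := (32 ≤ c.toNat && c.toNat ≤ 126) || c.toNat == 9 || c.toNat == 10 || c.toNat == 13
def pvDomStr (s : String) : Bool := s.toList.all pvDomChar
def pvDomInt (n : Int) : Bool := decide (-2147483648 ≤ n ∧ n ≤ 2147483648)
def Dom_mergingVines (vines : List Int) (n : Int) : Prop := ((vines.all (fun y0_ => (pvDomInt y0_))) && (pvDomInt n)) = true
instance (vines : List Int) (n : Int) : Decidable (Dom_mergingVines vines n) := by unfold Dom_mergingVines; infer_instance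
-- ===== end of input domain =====

-- B replaces A's n-fold composition of the pairwise-merge pass by ONE pass summing
-- contiguous blocks of size 2^min(n, bit_length(len)) — O(len) instead of O(n + n·len).

-- ===== PORT A =====
-- sumOnce: res = [vines[i] + vines[i+1] for i in range(0, len(vines)-1, 2)]; append vines[-1] if odd length
def sumOnceA (vines : List Int) : List Int :=
  let res := (PySem.List.pyRange 0 ((vines.length : Int) - 1) 2).map
      (fun i => PySem.List.pyGetD vines i 0 + PySem.List.pyGetD vines (i + 1) 0)
  if vines.length % 2 == 1 then res ++ [(PySem.List.pyGet? vines (-1)).getD 0] else res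

-- A composes sumOnce with itself n times (identity when n = 0); n < 0 raises in Python (excluded by Pre_)
def mergingVines (vines : List Int) (n : Int) : List Int :=
  sumOnceA^[n.toNat] vines

-- ===== PORT B =====
-- [sum(vines[i:i+size]) for i in range(0, L, size)]
def chunkSums (size : Nat) : List Int → List Int
  | [] => []
  | x :: xs => (((x :: xs).take size).foldl (· + ·) 0) :: chunkSums size (xs.drop (size - 1))
termination_by xs => xs.length
decreasing_by simp [List.length_drop]

def mergingVines_alt (vines : List Int) (n : Int) : List Int :=
  if vines.length = 0 then []
  else
    let m : Nat := min n.toNat (Nat.log2 vines.length + 1)   -- min(n, L.bit_length())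
    chunkSums (2 ^ m) vines

-- ===== PRECONDITION & SPEC =====
-- Pre_ excludes n < 0, where A raises TypeError (reduce over an empty list of functions).
def Pre_mergingVines (vines : List Int) (n : Int) : Prop := 0 ≤ n
instance (vines : List Int) (n : Int) : Decidable (Pre_mergingVines vines n) := by
  unfold Pre_mergingVines; infer_instance
def pvWitness_mergingVines : List Int × Int := ([1, 2, 3, 4, 5], 2)

def Spec_mergingVines (vines : List Int) (n : Int) (out : List Int) : Prop := out = mergingVines_alt vines n
instance (vines : List Int) (n : Int) (out : List Int) : Decidable (Spec_mergingVines vines n out) := by unfold Spec_mergingVines; infer_instance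

-- ===== CLAIM (what is proved, stated in full; the proofs are below) =====
def Claim_equal_mergingVines : Prop := ∀ (vines : List Int) (n : Int), Dom_mergingVines vines n → Pre_mergingVines vines n → Spec_mergingVines vines n (mergingVines vines n)

-- ===== LEMMAS AND PROOFS =====

theorem chunkSums_nil (s : Nat) : chunkSums s [] = [] := by simp [chunkSums]

theorem chunkSums_cons_ne (s : Nat) (hs : 1 ≤ s) (x : Int) (xs : List Int) :
    chunkSums s (x :: xs) = ((x :: xs).take s).sum :: chunkSums s ((x :: xs).drop s) := by
  obtain ⟨s', rfl⟩ : ∃ s', s = s' + 1 := ⟨s - 1, by omega⟩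
  rw [chunkSums, List.sum_eq_foldl]
  simp

theorem chunkSums_one (xs : List Int) : chunkSums 1 xs = xs := by
  induction xs with
  | nil => exact chunkSums_nil 1
  | cons x t ih => rw [chunkSums_cons_ne 1 le_rfl]; simp [ih]

theorem sumOnceA_nil : sumOnceA [] = [] := by decide

theorem sumOnceA_single (a : Int) : sumOnceA [a] = [a] := by
  simp [sumOnceA, PySem.List.pyRange, PySem.List.pyGet?_neg_one]

theorem res_norm (xs : List Int) :
    (PySem.List.pyRange 0 ((xs.length : Int) - 1) 2).map
        (fun i => PySem.List.pyGetD xs i 0 + PySem.List.pyGetD xs (i + 1) 0)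
      = (List.range (xs.length / 2)).map
        (fun k => xs.getD (2 * k) 0 + xs.getD (2 * k + 1) 0) := by
  rw [PySem.List.pyRange_of_pos 0 _ (by norm_num : (0:Int) < 2), List.map_map]
  have hc : (if (0:Int) < (xs.length:Int) - 1 then ((((xs.length:Int) - 1) - 0 + 2 - 1) / 2).toNat else 0) = xs.length / 2 := by
    split_ifs with h <;> omega
  rw [hc]
  refine List.map_congr_left ?_
  intro k _
  simp only [Function.comp]
  rw [PySem.List.pyGetD_of_nonneg _ _ (by positivity), PySem.List.pyGetD_of_nonneg _ _ (by positivity)]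
  congr 2 <;> omega

theorem sumOnceA_cons_cons (a b : Int) (t : List Int) :
    sumOnceA (a :: b :: t) = (a + b) :: sumOnceA t := by
  unfold sumOnceA
  rw [res_norm, res_norm]
  have hlen : (a :: b :: t).length = t.length + 2 := by simp
  rw [hlen]
  have hdiv : (t.length + 2) / 2 = t.length / 2 + 1 := by omega
  rw [hdiv, List.range_succ_eq_map, List.map_cons, List.map_map]
  have hmap : (List.map ((fun k => (a :: b :: t).getD (2 * k) 0 + (a :: b :: t).getD (2 * k + 1) 0) ∘ Nat.succ)
      (List.range (t.length / 2))) = (List.range (t.length / 2)).map (fun k => t.getD (2 * k) 0 + t.getD (2 * k + 1) 0) := by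
    refine List.map_congr_left ?_
    intro k _
    simp only [Function.comp]
    have e1 : (a :: b :: t).getD (2 * Nat.succ k) 0 = t.getD (2 * k) 0 := by
      have h1 : 2 * Nat.succ k = 2 * k + 1 + 1 := by omega
      rw [h1, List.getD_cons_succ, List.getD_cons_succ]
    have e2 : (a :: b :: t).getD (2 * Nat.succ k + 1) 0 = t.getD (2 * k + 1) 0 := by
      have h2 : 2 * Nat.succ k + 1 = 2 * k + 1 + 1 + 1 := by omega
      rw [h2, List.getD_cons_succ, List.getD_cons_succ]
    rw [e1, e2]
  rw [hmap]
  have hmod : (t.length + 2) % 2 = t.length % 2 := by omega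
  rw [hmod]
  by_cases hodd : t.length % 2 = 1
  · have htne : t ≠ [] := by intro h; subst h; simp at hodd
    simp only [hodd, beq_self_eq_true, if_true]
    obtain ⟨c, t', rfl⟩ := List.exists_cons_of_ne_nil htne
    rw [PySem.List.pyGet?_neg_one, PySem.List.pyGet?_neg_one,
        List.getLast?_cons_cons, List.getLast?_cons_cons]
    simp
  · have hb : (t.length % 2 == 1) = false := by simp [hodd]
    simp [hb]

theorem sumOnceA_eq_chunk2 (xs : List Int) : sumOnceA xs = chunkSums 2 xs := by
  induction hL : xs.length using Nat.strong_induction_on generalizing xs with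
  | _ L ih =>
    match xs with
    | [] => rw [sumOnceA_nil, chunkSums_nil]
    | [a] =>
      rw [sumOnceA_single, chunkSums_cons_ne 2 (by omega)]
      simp [chunkSums_nil]
    | a :: b :: t =>
      rw [sumOnceA_cons_cons, chunkSums_cons_ne 2 (by omega)]
      simp only [List.take_succ_cons, List.take_zero, List.drop_succ_cons, List.drop_zero,
        List.sum_cons, List.sum_nil]
      subst hL
      rw [ih t.length (by simp) t rfl]
      simp

theorem chunkSums_drop (s a : Nat) (hs : 1 ≤ s) (xs : List Int) :
    (chunkSums s xs).drop a = chunkSums s (xs.drop (a * s)) := by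
  induction a generalizing xs with
  | zero => simp
  | succ a ih =>
    cases xs with
    | nil => simp [chunkSums_nil]
    | cons x t =>
      rw [chunkSums_cons_ne s hs, List.drop_succ_cons, ih, List.drop_drop]
      congr 2
      ring

theorem chunkSums_take_sum (s a : Nat) (hs : 1 ≤ s) (xs : List Int) :
    ((chunkSums s xs).take a).sum = (xs.take (a * s)).sum := by
  induction a generalizing xs with
  | zero => simp
  | succ a ih =>
    cases xs with
    | nil => simp [chunkSums_nil]
    | cons x t =>
      rw [chunkSums_cons_ne s hs, List.take_succ_cons, List.sum_cons, ih]
      have : (a + 1) * s = s + a * s := by ring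
      rw [this, List.take_add, List.sum_append]

theorem chunkSums_ne_nil (s : Nat) (hs : 1 ≤ s) (xs : List Int) (h : xs ≠ []) :
    chunkSums s xs ≠ [] := by
  cases xs with
  | nil => exact absurd rfl h
  | cons x t => rw [chunkSums_cons_ne s hs]; simp

theorem chunkSums_comp (a s : Nat) (ha : 1 ≤ a) (hs : 1 ≤ s) (xs : List Int) :
    chunkSums a (chunkSums s xs) = chunkSums (a * s) xs := by
  induction hL : xs.length using Nat.strong_induction_on generalizing xs with
  | _ L ih =>
    cases xs with
    | nil => simp [chunkSums_nil]
    | cons x t =>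
      obtain ⟨y, ys, hys⟩ := List.exists_cons_of_ne_nil (chunkSums_ne_nil s hs (x :: t) (by simp))
      rw [hys, chunkSums_cons_ne a ha, ← hys,
        chunkSums_take_sum s a hs, chunkSums_drop s a hs,
        ih ((x :: t).drop (a * s)).length
          (by have h1 := Nat.mul_pos ha hs
              simp only [List.length_drop, List.length_cons] at hL ⊢
              omega) _ rfl,
        chunkSums_cons_ne (a * s) (Nat.mul_pos ha hs) x t]

theorem iterate_sumOnceA (k : Nat) (xs : List Int) :
    sumOnceA^[k] xs = chunkSums (2 ^ k) xs := by
  induction k generalizing xs with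
  | zero => simpa using (chunkSums_one xs).symm
  | succ k ih =>
    rw [Function.iterate_succ_apply, ih, sumOnceA_eq_chunk2,
      chunkSums_comp (2 ^ k) 2 (Nat.one_le_two_pow) (by omega), pow_succ]

theorem chunkSums_big (s : Nat) (xs : List Int) (h : xs ≠ []) (hlen : xs.length ≤ s) :
    chunkSums s xs = [xs.sum] := by
  cases xs with
  | nil => exact absurd rfl h
  | cons x t =>
    rw [chunkSums_cons_ne s (by simp at hlen; omega),
      List.take_of_length_le hlen, List.drop_of_length_le hlen, chunkSums_nil]

-- ===== VERDICT (by name: the statement is the Claim_ definition above) =====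
theorem mergingVines_spec : Claim_equal_mergingVines := by
  intro vines n _ hpre
  unfold Spec_mergingVines mergingVines mergingVines_alt
  rw [iterate_sumOnceA]
  by_cases hnil : vines.length = 0
  · rw [if_pos hnil]
    cases vines with
    | nil => exact chunkSums_nil _
    | cons x t => simp at hnil
  · rw [if_neg hnil]
    show chunkSums (2 ^ n.toNat) vines = chunkSums (2 ^ (min n.toNat (Nat.log2 vines.length + 1))) vines
    by_cases hle : n.toNat ≤ Nat.log2 vines.length + 1
    · rw [Nat.min_eq_left hle]
    · have hmin : min n.toNat (Nat.log2 vines.length + 1) = Nat.log2 vines.length + 1 := by omega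
      have hne : vines ≠ [] := by cases vines <;> simp_all
      have hlg : vines.length < 2 ^ (Nat.log2 vines.length + 1) := Nat.lt_log2_self
      have h2 : vines.length ≤ 2 ^ n.toNat :=
        le_trans (Nat.le_of_lt hlg)
          (Nat.pow_le_pow_right (by omega) (by omega : Nat.log2 vines.length + 1 ≤ n.toNat))
      rw [hmin, chunkSums_big _ _ hne h2, chunkSums_big _ _ hne (by omega)]
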